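-- pv_equiv track=rewrite | github.com/MAydedie/create_graph_new | skill_callchain_v2/01_build_clarified_task.py | _extract_first_label_value
-- ===== SOURCE A (Python) =====
-- def _extract_first_label_value(raw_task: str, labels: list[str]) -> str:
--     for raw_line in raw_task.splitlines():
--         line = raw_line.strip()
--         for label in labels:
--             prefix = f"{label}："
--             alt_prefix = f"{label}:"
--             if line.startswith(prefix):
--                 return line[len(prefix):].strip()
--             if line.startswith(alt_prefix):
--                 return line[len(alt_prefix):].strip()
--     return ""
-- ===== SOURCE B (Python) =====
-- def _extract_first_label_value(raw_task: str, labels: list[str]) -> str: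
--     # Build label -> first-occurrence index once, then scan each line's colon
--     # positions and pick the candidate whose label comes earliest in `labels`.
--     rank = {}
--     for i, label in enumerate(labels):
--         if label not in rank:
--             rank[label] = i
--     for raw_line in raw_task.splitlines():
--         line = raw_line.strip()
--         best = None  # (rank of matched label, index of its colon)
--         for j, ch in enumerate(line):
--             if ch == ":" or ch == "：":
--                 r = rank.get(line[:j])
--                 if r is not None and (best is None or r < best[0]):
--                     best = (r, j)
--         if best is not None:
--             return line[best[1] + 1:].strip()
--     return ""
-- ===== Notes on version B (the rewrite author's own statement) =====
-- stated objective: alternative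
-- what changed: B precomputes a label->first-index rank dictionary once and then, per stripped line, scans the line's colon positions and picks the candidate prefix of minimal rank, instead of A's per-line inner loop over all labels with two startswith tests each.
import Mathlib
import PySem

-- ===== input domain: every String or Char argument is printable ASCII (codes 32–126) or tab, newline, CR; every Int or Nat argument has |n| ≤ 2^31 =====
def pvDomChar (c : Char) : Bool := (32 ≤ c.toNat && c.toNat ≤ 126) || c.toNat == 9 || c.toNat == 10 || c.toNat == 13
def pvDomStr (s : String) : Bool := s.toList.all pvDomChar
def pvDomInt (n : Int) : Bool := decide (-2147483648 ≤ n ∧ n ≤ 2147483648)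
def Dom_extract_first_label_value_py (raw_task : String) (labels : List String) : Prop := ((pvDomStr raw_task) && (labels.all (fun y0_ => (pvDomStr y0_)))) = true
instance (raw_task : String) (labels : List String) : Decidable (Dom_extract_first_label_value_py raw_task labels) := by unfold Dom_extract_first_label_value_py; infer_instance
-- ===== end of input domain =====

-- B replaces A's per-line inner loop over all labels by a precomputed label-rank dictionary
-- and a single scan over each line's colon positions (objective: alternative algorithm).


-- ===== PORT A =====
-- inner 'for label in labels' loop; line[len(prefix):] is a slice at a
-- nonnegative in-range index, exactly List.drop prefix.length here.
def pvAInner (cs : List Char) : List String → Option (List Char)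
  | [] => none
  | label :: rest =>
      let prefx := label.toList ++ ['：']
      let altPrefx := label.toList ++ [':']
      if PySem.Chars.startswith cs prefx then
        some (PySem.Chars.strip (cs.drop prefx.length))
      else if PySem.Chars.startswith cs altPrefx then
        some (PySem.Chars.strip (cs.drop altPrefx.length))
      else pvAInner cs rest

-- outer 'for raw_line in raw_task.splitlines()' loop
def pvALines (labels : List String) : List String → String
  | [] => ""
  | raw_line :: rest =>
      let cs := (PySem.Str.strip raw_line).toList
      match pvAInner cs labels with
      | some v => String.ofList v
      | none => pvALines labels rest

def extract_first_label_value_py (raw_task : String) (labels : List String) : String :=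
  pvALines labels (PySem.Str.splitlines raw_task)

-- ===== PORT B =====
-- 'for i, l in enumerate(labels): if l not in rank: rank[l] = i'
def pvRank : List (Int × String) → PySem.Dict String Int → PySem.Dict String Int
  | [], rank => rank
  | (i, label) :: rest, rank =>
      pvRank rest (if rank.contains label then rank else rank.insert label i)

-- 'for j, ch in enumerate(line)' loop carrying best = None | (rank, colon index)
def pvBScan (rank : PySem.Dict String Int) (cs : List Char) :
    List (Int × Char) → Option (Int × Int) → Option (Int × Int)
  | [], best => best
  | (j, ch) :: rest, best =>
      if ch = ':' ∨ ch = '：' then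
        match rank.get? (String.ofList (PySem.List.slice cs none (some j))) with
        | some r =>
            pvBScan rank cs rest
              (match best with
               | none => some (r, j)
               | some (br, bj) => if r < br then some (r, j) else some (br, bj))
        | none => pvBScan rank cs rest best
      else pvBScan rank cs rest best

def pvBLines (rank : PySem.Dict String Int) : List String → String
  | [] => ""
  | raw_line :: rest =>
      let cs := (PySem.Str.strip raw_line).toList
      match pvBScan rank cs (PySem.List.enumerate cs 0) none with
      | some (_, j) =>
          String.ofList (PySem.Chars.strip (PySem.List.slice cs (some (j + 1)) none))
      | none => pvBLines rank rest

def extract_first_label_value_py_alt (raw_task : String) (labels : List String) : String :=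
  let rank := pvRank (PySem.List.enumerate labels 0) PySem.Dict.empty
  pvBLines rank (PySem.Str.splitlines raw_task)

-- ===== PRECONDITION & SPEC =====
def Spec_extract_first_label_value_py (raw_task : String) (labels : List String) (out : String) : Prop := out = extract_first_label_value_py_alt raw_task labels
instance (raw_task : String) (labels : List String) (out : String) : Decidable (Spec_extract_first_label_value_py raw_task labels out) := by unfold Spec_extract_first_label_value_py; infer_instance

-- ===== CLAIM (what is proved, stated in full; the proofs are below) =====
def Claim_equal_extract_first_label_value_py : Prop := ∀ (raw_task : String) (labels : List String), Dom_extract_first_label_value_py raw_task labels → Spec_extract_first_label_value_py raw_task labels (extract_first_label_value_py raw_task labels)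

-- ===== LEMMAS AND PROOFS =====

-- A label "matches" the (stripped) line: both of A's startswith tests folded together.
def pvMatch (cs : List Char) (label : String) : Bool :=
  PySem.Chars.startswith cs (label.toList ++ ['：']) ||
  PySem.Chars.startswith cs (label.toList ++ [':'])

theorem pvAInner_eq_find (cs : List Char) (labels : List String) :
    pvAInner cs labels =
      (labels.find? (pvMatch cs)).map
        (fun l => PySem.Chars.strip (cs.drop (l.toList.length + 1))) := by
  induction labels with
  | nil => rfl
  | cons l rest ih =>
      simp only [pvAInner, pvMatch, List.find?_cons]
      by_cases h1 : PySem.Chars.startswith cs (l.toList ++ ['：'])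
      · simp [h1]
      · by_cases h2 : PySem.Chars.startswith cs (l.toList ++ [':'])
        · simp [h1, h2]
        · simp [h1, h2, ih]

theorem pvPrefix_snoc_iff (s xs : List Char) (c : Char) :
    (xs ++ [c]) <+: s ↔ s.take xs.length = xs ∧ s[xs.length]? = some c := by
  constructor
  · rintro ⟨t, ht⟩
    have hs : s = xs ++ c :: t := by rw [← ht]; simp
    subst hs
    refine ⟨by simp, ?_⟩
    rw [List.getElem?_append_right (le_refl _)]
    simp
  · rintro ⟨h1, h2⟩
    obtain ⟨hlt, hc⟩ := List.getElem?_eq_some_iff.mp h2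
    refine ⟨s.drop (xs.length + 1), ?_⟩
    have hs : xs ++ [c] ++ s.drop (xs.length + 1) = xs ++ c :: s.drop (xs.length + 1) := by simp
    rw [hs]
    conv_rhs => rw [← List.take_append_drop xs.length s]
    rw [h1, List.drop_eq_getElem_cons hlt, hc]

theorem pvMatch_iff (cs : List Char) (l : String) :
    pvMatch cs l = true ↔
      cs.take l.toList.length = l.toList ∧
        (cs[l.toList.length]? = some ':' ∨ cs[l.toList.length]? = some '：') := by
  simp only [pvMatch, Bool.or_eq_true, PySem.Chars.startswith_iff, pvPrefix_snoc_iff]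
  tauto

-- the rank dictionary holds each label's first-occurrence index
theorem pvRank_get? (labels : List String) :
    ∀ (s : Int) (d : PySem.Dict String Int) (lbl : String),
      (pvRank (PySem.List.enumerate labels s) d).get? lbl =
        ((d.get? lbl).orElse (fun _ =>
          if lbl ∈ labels then some (s + (labels.idxOf lbl : Int)) else none)) := by
  induction labels with
  | nil =>
      intro s d lbl
      cases h : d.get? lbl <;>
        simp [PySem.List.enumerate, pvRank, h, Option.orElse]
  | cons l rest ih =>
      intro s d lbl
      rw [PySem.List.enumerate_cons]
      simp only [pvRank]
      rw [ih (s + 1)]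
      rcases h : d.get? lbl with _ | v
      · by_cases heq : lbl = l
        · subst heq
          have hco : d.contains lbl = false :=
            (PySem.Dict.get?_eq_none_iff_contains d lbl).mp h
          rw [if_neg (by simp [hco])]
          rw [PySem.Dict.get?_insert_self]
          simp [Option.orElse, List.idxOf_cons_self]
        · have hget : (if d.contains l = true then d else d.insert l s).get? lbl = none := by
            split_ifs
            · exact h
            · rw [PySem.Dict.get?_insert_of_ne _ _ heq]; exact h
          rw [hget]
          simp only [Option.orElse]
          have hidx : List.idxOf lbl (l :: rest) = List.idxOf lbl rest + 1 := by
            rw [List.idxOf_cons]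
            have : (l == lbl) = false := by simp [Ne.symm heq]
            simp [this]
          by_cases hm : lbl ∈ rest
          · simp only [List.mem_cons, hm, or_true, if_true, hidx]
            congr 1
            push_cast
            ring
          · have : ¬ lbl ∈ l :: rest := by simp [heq, hm]
            rw [if_neg hm, if_neg this]
      · have hget : (if d.contains l = true then d else d.insert l s).get? lbl = some v := by
          split_ifs with hco
          · exact h
          · by_cases heq : lbl = l
            · subst heq
              exact absurd ((PySem.Dict.get?_eq_none_iff_contains d lbl).mpr
                (by simp [hco])) (by simp [h])
            · rw [PySem.Dict.get?_insert_of_ne _ _ heq]; exact h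
        rw [hget]
        simp [Option.orElse]

-- scan = fold of a min-combine over the candidate list
def pvComb (best : Option (Int × Int)) (y : Int × Int) : Option (Int × Int) :=
  match best with
  | none => some y
  | some (br, bj) => if y.1 < br then some y else some (br, bj)

def pvCands (rank : PySem.Dict String Int) (cs : List Char) (ps : List (Int × Char)) :
    List (Int × Int) :=
  ps.filterMap (fun p =>
    if p.2 = ':' ∨ p.2 = '：' then
      (rank.get? (String.ofList (PySem.List.slice cs none (some p.1)))).map (fun r => (r, p.1))
    else none)

theorem pvBScan_eq_foldl (rank : PySem.Dict String Int) (cs : List Char) :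
    ∀ (ps : List (Int × Char)) (best : Option (Int × Int)),
      pvBScan rank cs ps best = (pvCands rank cs ps).foldl pvComb best := by
  intro ps
  induction ps with
  | nil => intro best; rfl
  | cons p rest ih =>
      intro best
      obtain ⟨j, ch⟩ := p
      by_cases hc : ch = ':' ∨ ch = '：'
      · rcases h : rank.get? (String.ofList (PySem.List.slice cs none (some j))) with _ | r
        · simp [pvBScan, pvCands, hc, h, ih]
        · simp only [pvBScan, pvCands, List.filterMap_cons, hc, if_true, h, Option.map_some]
          rw [ih]
          rfl
      · simp [pvBScan, pvCands, hc, ih]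

theorem pvFold_keep (x : Int × Int) :
    ∀ (l : List (Int × Int)), (∀ y ∈ l, ¬ (y.1 < x.1)) →
      l.foldl pvComb (some x) = some x := by
  intro l
  induction l with
  | nil => intro _; rfl
  | cons y rest ih =>
      intro h
      have hy := h y (by simp)
      simp only [List.foldl_cons, pvComb]
      rw [if_neg hy]
      exact ih (fun z hz => h z (by simp [hz]))

theorem pvFold_min (x : Int × Int) :
    ∀ (l : List (Int × Int)), x ∈ l → (∀ y ∈ l, x.1 ≤ y.1) →
      (∀ y ∈ l, y.1 = x.1 → y = x) →
      ∀ (b : Option (Int × Int)), (b = none ∨ ∃ z, b = some z ∧ x.1 < z.1) →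
        l.foldl pvComb b = some x := by
  intro l
  induction l with
  | nil => intro hx; exact absurd hx (by simp)
  | cons y rest ih =>
      intro hx hmin huniq b hb
      by_cases hyx : y = x
      · subst hyx
        have hstep : pvComb b y = some y := by
          rcases hb with hb | ⟨z, hz, hlt⟩
          · simp [hb, pvComb]
          · simp [hz, pvComb, hlt]
        simp only [List.foldl_cons, hstep]
        exact pvFold_keep y rest (fun z hz => not_lt.mpr (hmin z (by simp [hz])))
      · have hxrest : x ∈ rest := by
          rcases List.mem_cons.mp hx with h | h
          · exact absurd h.symm hyx
          · exact h
        have hygt : x.1 < y.1 := by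
          rcases lt_or_eq_of_le (hmin y (by simp)) with h | h
          · exact h
          · exact absurd (huniq y (by simp) h.symm) hyx
        simp only [List.foldl_cons]
        refine ih hxrest (fun z hz => hmin z (by simp [hz]))
          (fun z hz hz1 => huniq z (by simp [hz]) hz1) _ ?_
        rcases hb with hb | ⟨z, hz, hlt⟩
        · subst hb
          exact Or.inr ⟨y, rfl, hygt⟩
        · subst hz
          simp only [pvComb]
          by_cases hc : y.1 < z.1
          · rw [if_pos hc]; exact Or.inr ⟨y, rfl, hygt⟩
          · rw [if_neg hc]; exact Or.inr ⟨z, rfl, hlt⟩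

-- membership in the candidate list of the full enumeration, unpacked
theorem pvMem_cands (rank : PySem.Dict String Int) (cs : List Char) (y : Int × Int) :
    y ∈ pvCands rank cs (PySem.List.enumerate cs 0) ↔
      ∃ (k : Nat) (hk : k < cs.length), y.2 = (k : Int) ∧
        (cs[k]'hk = ':' ∨ cs[k]'hk = '：') ∧
        rank.get? (String.ofList (cs.take k)) = some y.1 := by
  simp only [pvCands, List.mem_filterMap]
  constructor
  · rintro ⟨p, hp, hy⟩
    rcases (PySem.List.mem_enumerate_iff cs 0 p).mp hp with ⟨k, hk, rfl⟩
    simp only [zero_add] at hy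
    split_ifs at hy with hc
    rcases Option.map_eq_some_iff.mp hy with ⟨r, hr, rfl⟩
    rw [PySem.List.slice_to_natCast] at hr
    exact ⟨k, hk, rfl, hc, hr⟩
  · rintro ⟨k, hk, hy2, hc, hr⟩
    refine ⟨((k : Int), cs[k]'hk), (PySem.List.mem_enumerate_iff cs 0 _).mpr ⟨k, hk, by simp⟩, ?_⟩
    rw [if_pos hc, PySem.List.slice_to_natCast, hr]
    obtain ⟨y1, y2⟩ := y
    simp_all

-- per-line equality of the two inner computations
theorem pvLine_eq (labels : List String) (cs : List Char) :
    (pvBScan (pvRank (PySem.List.enumerate labels 0) PySem.Dict.empty) cs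
        (PySem.List.enumerate cs 0) none).map
      (fun p => PySem.Chars.strip (PySem.List.slice cs (some (p.2 + 1)) none)) =
    pvAInner cs labels := by
  have hrank : ∀ lbl, (pvRank (PySem.List.enumerate labels 0) PySem.Dict.empty).get? lbl =
      if lbl ∈ labels then some ((labels.idxOf lbl : Int)) else none := by
    intro lbl
    rw [pvRank_get? labels 0 PySem.Dict.empty lbl]
    have hemp : (PySem.Dict.empty : PySem.Dict String Int).get? lbl = none := rfl
    simp [hemp, Option.orElse]
  rw [pvAInner_eq_find, pvBScan_eq_foldl]
  -- every candidate of the scan corresponds to a matching label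
  have hcand : ∀ y ∈ pvCands (pvRank (PySem.List.enumerate labels 0) PySem.Dict.empty) cs
      (PySem.List.enumerate cs 0),
      ∃ (k : Nat), k < cs.length ∧ y.2 = (k : Int) ∧
        String.ofList (cs.take k) ∈ labels ∧
        pvMatch cs (String.ofList (cs.take k)) = true ∧
        y.1 = (labels.idxOf (String.ofList (cs.take k)) : Int) := by
    intro y hy
    rcases (pvMem_cands _ cs y).mp hy with ⟨k, hk, hy2, hc, hr⟩
    rw [hrank] at hr
    by_cases hm : String.ofList (cs.take k) ∈ labels
    · rw [if_pos hm] at hr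
      have htl : (String.ofList (cs.take k)).toList = cs.take k := by simp
      have hlen : (cs.take k).length = k := by simp [List.length_take, Nat.min_eq_left hk.le]
      refine ⟨k, hk, hy2, hm, ?_, by exact (Option.some_inj.mp hr).symm⟩
      rw [pvMatch_iff, htl, hlen]
      refine ⟨by simp, ?_⟩
      have : cs[k]? = some (cs[k]'hk) := List.getElem?_eq_some_iff.mpr ⟨hk, rfl⟩
      rcases hc with hc | hc
      · exact Or.inl (by rw [this, hc])
      · exact Or.inr (by rw [this, hc])
    · rw [if_neg hm] at hr
      exact absurd hr (by simp)
  rcases hf : labels.find? (pvMatch cs) with _ | l₀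
  · -- no label matches: the candidate list is empty
    have hnone := List.find?_eq_none.mp hf
    have hnil : pvCands (pvRank (PySem.List.enumerate labels 0) PySem.Dict.empty) cs
        (PySem.List.enumerate cs 0) = [] := by
      rw [List.eq_nil_iff_forall_not_mem]
      intro y hy
      rcases hcand y hy with ⟨k, _, _, hm, hmatch, _⟩
      exact hnone _ hm hmatch
    rw [hnil]
    rfl
  · -- l₀ is the first matching label
    obtain ⟨hm₀, as, bs, hsplit, hprev⟩ := List.find?_eq_some_iff_append.mp hf
    obtain ⟨htake, hcol⟩ := (pvMatch_iff cs l₀).mp hm₀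
    have hn₀lt : l₀.toList.length < cs.length := by
      rcases hcol with hc | hc <;> exact (List.getElem?_eq_some_iff.mp hc).1
    have hl₀mem : l₀ ∈ labels := by rw [hsplit]; simp
    have hidx_of_mem : ∀ l : String, l ∈ labels → pvMatch cs l = true →
        (labels.idxOf l₀ : Nat) ≤ labels.idxOf l ∧
          (labels.idxOf l = labels.idxOf l₀ → l = l₀) := by
      intro l _ hml
      have hnotas : l ∉ as := by
        intro hin
        have := hprev l hin
        simp [hml] at this
      have hl₀notas : l₀ ∉ as := by
        intro hin
        have := hprev l₀ hin
        simp [hm₀] at this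
      have hidx₀ : labels.idxOf l₀ = as.length := by
        rw [hsplit, List.idxOf_append, if_neg hl₀notas, List.idxOf_cons_self]
        omega
      have hidxl : labels.idxOf l = List.idxOf l (l₀ :: bs) + as.length := by
        rw [hsplit, List.idxOf_append, if_neg hnotas]
      constructor
      · rw [hidx₀, hidxl]; omega
      · intro heq
        rw [hidxl, hidx₀] at heq
        have hzero : List.idxOf l (l₀ :: bs) = 0 := by omega
        rw [List.idxOf_cons] at hzero
        by_cases hll : l₀ == l
        · exact (LawfulBEq.eq_of_beq hll).symm
        · simp [hll] at hzero
    -- the minimal candidate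
    have hxmem : ((labels.idxOf l₀ : Int), (l₀.toList.length : Int)) ∈
        pvCands (pvRank (PySem.List.enumerate labels 0) PySem.Dict.empty) cs
          (PySem.List.enumerate cs 0) := by
      rw [pvMem_cands]
      refine ⟨l₀.toList.length, hn₀lt, rfl, ?_, ?_⟩
      · have hg : cs[l₀.toList.length]? = some (cs[l₀.toList.length]'hn₀lt) :=
          List.getElem?_eq_some_iff.mpr ⟨hn₀lt, rfl⟩
        rcases hcol with hc | hc
        · rw [hg] at hc; exact Or.inl (Option.some_inj.mp hc)
        · rw [hg] at hc; exact Or.inr (Option.some_inj.mp hc)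
      · rw [htake]
        simp [hrank, hl₀mem]
    have hxk : ∀ y ∈ pvCands (pvRank (PySem.List.enumerate labels 0) PySem.Dict.empty) cs
        (PySem.List.enumerate cs 0),
        ((labels.idxOf l₀ : Int), (l₀.toList.length : Int)).1 ≤ y.1 ∧
          (y.1 = ((labels.idxOf l₀ : Int), (l₀.toList.length : Int)).1 →
            y = ((labels.idxOf l₀ : Int), (l₀.toList.length : Int))) := by
      intro y hy
      rcases hcand y hy with ⟨k, hk, hy2, hm, hmatch, hy1⟩
      obtain ⟨hle, huni⟩ := hidx_of_mem _ hm hmatch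
      dsimp only
      constructor
      · rw [hy1]; exact_mod_cast hle
      · intro heq
        rw [hy1] at heq
        have hidxeq : labels.idxOf (String.ofList (cs.take k)) = labels.idxOf l₀ := by
          exact_mod_cast heq
        have hll := huni hidxeq
        have h1 : cs.take k = l₀.toList := by
          have := congrArg String.toList hll
          simpa using this
        have hkn : k = l₀.toList.length := by
          have h2 := congrArg List.length h1
          rw [List.length_take, Nat.min_eq_left hk.le] at h2
          exact h2
        obtain ⟨y1, y2⟩ := y
        simp only [Prod.mk.injEq]
        constructor
        · rw [hll] at hy1; exact hy1
        · rw [hkn] at hy2; exact hy2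
    rw [pvFold_min ((labels.idxOf l₀ : Int), (l₀.toList.length : Int)) _ hxmem
      (fun y hy => (hxk y hy).1) (fun y hy => (hxk y hy).2) none (Or.inl rfl)]
    simp only [Option.map_some]
    congr 1
    have hcast : ((l₀.toList.length : Int) + 1) = ((l₀.toList.length + 1 : Nat) : Int) := by
      push_cast; ring
    rw [hcast, PySem.List.slice_from_natCast]

-- outer loops agree line by line
theorem pvLines_eq (labels : List String) (lines : List String) :
    pvBLines (pvRank (PySem.List.enumerate labels 0) PySem.Dict.empty) lines =
      pvALines labels lines := by
  induction lines with
  | nil => rfl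
  | cons raw rest ih =>
      simp only [pvBLines, pvALines]
      rw [← pvLine_eq labels ((PySem.Str.strip raw).toList)]
      rcases h : pvBScan (pvRank (PySem.List.enumerate labels 0) PySem.Dict.empty)
          ((PySem.Str.strip raw).toList)
          (PySem.List.enumerate ((PySem.Str.strip raw).toList) 0) none with _ | p
      · simp [ih]
      · simp

-- ===== VERDICT (by name: the statement is the Claim_ definition above) =====
theorem extract_first_label_value_py_spec : Claim_equal_extract_first_label_value_py := by
  intro raw_task labels _
  unfold Spec_extract_first_label_value_py extract_first_label_value_py extract_first_label_value_py_alt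
  exact (pvLines_eq labels (PySem.Str.splitlines raw_task)).symm
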